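-- pv_equiv track=rewrite | github.com/techeer-sv/Surviving-the-Code | jimin/week1/2891.py | solve
-- ===== SOURCE A (Python) =====
-- def solve(N: int, S: int, R: int, brokenTeam: set[int], onemoreTeam: set[int]) -> int:
--     # 내부에서만 사용할 복사본으로 작업
--     brokenTeam = set(brokenTeam)
--     onemoreTeam = set(onemoreTeam)
--
--     # 자기 여분을 자기에게 쓰는 경우 제거
--     both = brokenTeam & onemoreTeam
--     brokenTeam -= both
--     onemoreTeam -= both
--
--     answer = 0
--     # 결정적 결과를 위해 정렬 순회
--     for team in sorted(brokenTeam):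
--         if team - 1 in onemoreTeam:
--             onemoreTeam.remove(team - 1)
--         elif team + 1 in onemoreTeam:
--             onemoreTeam.remove(team + 1)
--         else:
--             answer += 1
--     return answer
-- ===== SOURCE B (Python) =====
-- def solve(N: int, S: int, R: int, brokenTeam: set, onemoreTeam: set) -> int:
--     # teams that can fix themselves with their own spare
--     both = brokenTeam & onemoreTeam
--     broken = sorted(brokenTeam - both)
--     spares = sorted(onemoreTeam - both)
--     answer = 0
--     j = 0
--     for team in broken:
--         while j < len(spares) and spares[j] < team - 1:
--             j += 1
--         if j < len(spares) and spares[j] <= team + 1: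
--             j += 1
--         else:
--             answer += 1
--     return answer
-- ===== Notes on version B (the rewrite author's own statement) =====
-- stated objective: alternative
-- what changed: Replaces A's per-team membership tests and removals on a mutable spare set with a single two-pointer merge sweep over the two sorted lists (broken teams and spares), never mutating a set.
import Mathlib
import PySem

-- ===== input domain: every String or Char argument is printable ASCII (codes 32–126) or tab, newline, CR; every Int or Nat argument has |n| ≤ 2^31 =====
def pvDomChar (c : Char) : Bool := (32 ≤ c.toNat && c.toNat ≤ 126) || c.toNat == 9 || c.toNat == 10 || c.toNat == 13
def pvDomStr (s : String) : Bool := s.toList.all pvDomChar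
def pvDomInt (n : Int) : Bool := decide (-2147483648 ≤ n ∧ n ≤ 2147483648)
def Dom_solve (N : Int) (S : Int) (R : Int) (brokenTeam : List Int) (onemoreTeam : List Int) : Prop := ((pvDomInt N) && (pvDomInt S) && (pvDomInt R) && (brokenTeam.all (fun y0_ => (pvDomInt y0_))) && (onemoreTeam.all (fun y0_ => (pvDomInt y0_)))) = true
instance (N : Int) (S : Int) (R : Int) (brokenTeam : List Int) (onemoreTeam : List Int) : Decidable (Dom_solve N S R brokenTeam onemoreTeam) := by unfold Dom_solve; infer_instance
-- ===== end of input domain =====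

-- B replaces A's per-team set lookups and removals on a mutable spare set by a
-- two-pointer merge sweep over the two sorted lists (alternative decomposition;
-- A mutates only local copies, so only the return value is at stake).

-- ===== PORT A =====
-- literal transliteration of A: copy the sets, drop the intersection from both,
-- then fold over sorted(brokenTeam) carrying (onemoreTeam set, answer).
-- 'onemoreTeam.remove(x)' runs only under the 'x in onemoreTeam' guard, so
-- 'remove?' is always 'some' there and '.getD' is exact.
def solve (N : Int) (S : Int) (R : Int) (brokenTeam : List Int) (onemoreTeam : List Int) : Int :=
  let bt : PySem.Set Int := PySem.Set.ofList brokenTeam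
  let ot : PySem.Set Int := PySem.Set.ofList onemoreTeam
  let both : PySem.Set Int := PySem.Set.inter bt ot
  let bt2 : PySem.Set Int := PySem.Set.diff bt both
  let ot2 : PySem.Set Int := PySem.Set.diff ot both
  let st := (PySem.List.sorted bt2 (fun x => x) false).foldl
    (fun (st : List Int × Int) team =>
      if PySem.Set.contains st.1 (team - 1) then
        ((PySem.Set.remove? st.1 (team - 1)).getD st.1, st.2)
      else if PySem.Set.contains st.1 (team + 1) then
        ((PySem.Set.remove? st.1 (team + 1)).getD st.1, st.2)
      else
        (st.1, st.2 + 1)) (ot2, 0)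
  st.2

-- ===== PORT B =====
-- the 'while j < len(spares) and spares[j] < team - 1: j += 1' loop of Source B
def pvSkip (spares : List Int) (t : Int) (j : Nat) : Nat :=
  if h : j < spares.length then
    if spares[j] < t - 1 then pvSkip spares t (j + 1) else j
  else j
termination_by spares.length - j

def solve_alt (N : Int) (S : Int) (R : Int) (brokenTeam : List Int) (onemoreTeam : List Int) : Int :=
  let both : PySem.Set Int :=
    PySem.Set.inter (PySem.Set.ofList brokenTeam) (PySem.Set.ofList onemoreTeam)
  let broken := PySem.List.sorted (PySem.Set.diff (PySem.Set.ofList brokenTeam) both) (fun x => x) false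
  let spares := PySem.List.sorted (PySem.Set.diff (PySem.Set.ofList onemoreTeam) both) (fun x => x) false
  let st := broken.foldl
    (fun (st : Nat × Int) team =>
      let j := pvSkip spares team st.1
      if h : j < spares.length then
        if spares[j] ≤ team + 1 then (j + 1, st.2) else (j, st.2 + 1)
      else (j, st.2 + 1)) (0, 0)
  st.2

-- ===== PRECONDITION & SPEC =====
def Spec_solve (N : Int) (S : Int) (R : Int) (brokenTeam : List Int) (onemoreTeam : List Int) (out : Int) : Prop := out = solve_alt N S R brokenTeam onemoreTeam
instance (N : Int) (S : Int) (R : Int) (brokenTeam : List Int) (onemoreTeam : List Int) (out : Int) : Decidable (Spec_solve N S R brokenTeam onemoreTeam out) := by unfold Spec_solve; infer_instance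

-- ===== CLAIM (what is proved, stated in full; the proofs are below) =====
def Claim_equal_solve : Prop := ∀ (N : Int) (S : Int) (R : Int) (brokenTeam : List Int) (onemoreTeam : List Int), Dom_solve N S R brokenTeam onemoreTeam → Spec_solve N S R brokenTeam onemoreTeam (solve N S R brokenTeam onemoreTeam)

-- ===== LEMMAS AND PROOFS =====

-- A's loop body, named for the proofs (identical to the lambda in `solve`)
def stepA : List Int × Int → Int → List Int × Int := fun st team =>
  if PySem.Set.contains st.1 (team - 1) then
    ((PySem.Set.remove? st.1 (team - 1)).getD st.1, st.2)
  else if PySem.Set.contains st.1 (team + 1) then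
    ((PySem.Set.remove? st.1 (team + 1)).getD st.1, st.2)
  else
    (st.1, st.2 + 1)

-- B's loop body, named for the proofs (identical to the lambda in `solve_alt`)
def stepB (spares : List Int) : Nat × Int → Int → Nat × Int := fun st team =>
  let j := pvSkip spares team st.1
  if h : j < spares.length then
    if spares[j] ≤ team + 1 then (j + 1, st.2) else (j, st.2 + 1)
  else (j, st.2 + 1)

theorem mem_dropWhile_of_not {x : Int} {p : Int → Bool} {l : List Int}
    (hx : x ∈ l) (hp : p x = false) : x ∈ l.dropWhile p := by
  have hx' : x ∈ l.takeWhile p ++ l.dropWhile p := by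
    rw [List.takeWhile_append_dropWhile]; exact hx
  rcases List.mem_append.mp hx' with h | h
  · have := List.mem_takeWhile_imp h
    rw [hp] at this; cases this
  · exact h

theorem dropWhile_head_false {p : Int → Bool} :
    ∀ (l : List Int) {h0 : Int} {tl : List Int}, l.dropWhile p = h0 :: tl → p h0 = false := by
  intro l
  induction l with
  | nil => intro h0 tl h; simp [List.dropWhile] at h
  | cons a l ih =>
    intro h0 tl h
    rw [List.dropWhile_cons] at h
    by_cases hp : p a
    · rw [if_pos hp] at h; exact ih h
    · rw [if_neg hp] at h
      obtain ⟨h1, _⟩ := List.cons_eq_cons.mp h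
      rw [← h1]; simpa using hp

theorem pvSkip_drop (spares : List Int) (t : Int) (j : Nat) :
    spares.drop (pvSkip spares t j) = (spares.drop j).dropWhile (fun x => decide (x < t - 1)) := by
  fun_induction pvSkip spares t j with
  | case1 j h hlt ih =>
    rw [ih, List.drop_eq_getElem_cons h, List.dropWhile_cons]
    simp [hlt]
  | case2 j h hlt =>
    rw [List.drop_eq_getElem_cons h, List.dropWhile_cons]
    simp [hlt]
  | case3 j h =>
    rw [List.drop_eq_nil_of_le (Nat.le_of_not_lt h)]
    simp

theorem stepA_mem_left {ot : List Int} {ans t : Int} (h : (t - 1) ∈ ot) :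
    stepA (ot, ans) t = (PySem.Set.discard ot (t - 1), ans) := by
  simp [stepA, h, PySem.Set.remove?_of_mem h]

theorem stepA_mem_right {ot : List Int} {ans t : Int} (hl : (t - 1) ∉ ot) (hr : (t + 1) ∈ ot) :
    stepA (ot, ans) t = (PySem.Set.discard ot (t + 1), ans) := by
  have hc1 : ¬ PySem.Set.contains ot (t - 1) = true := fun hc => hl ((PySem.Set.contains_iff _ _).mp hc)
  have hc2 : PySem.Set.contains ot (t + 1) = true := (PySem.Set.contains_iff _ _).mpr hr
  simp [stepA, hl, hr, PySem.Set.remove?_of_mem hr]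

theorem stepA_none {ot : List Int} {ans t : Int} (hl : (t - 1) ∉ ot) (hr : (t + 1) ∉ ot) :
    stepA (ot, ans) t = (ot, ans + 1) := by
  have hc1 : ¬ PySem.Set.contains ot (t - 1) = true := fun hc => hl ((PySem.Set.contains_iff _ _).mp hc)
  have hc2 : ¬ PySem.Set.contains ot (t + 1) = true := fun hc => hr ((PySem.Set.contains_iff _ _).mp hc)
  simp [stepA, hl, hr]

theorem stepB_consume {spares : List Int} {j j' : Nat} {ans t : Int}
    (hj : pvSkip spares t j = j') (h : j' < spares.length) (hle : spares[j'] ≤ t + 1) :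
    stepB spares (j, ans) t = (j' + 1, ans) := by
  simp only [stepB]
  rw [hj, dif_pos h, if_pos hle]

theorem stepB_fail_long {spares : List Int} {j j' : Nat} {ans t : Int}
    (hj : pvSkip spares t j = j') (h : j' < spares.length) (hgt : ¬ spares[j'] ≤ t + 1) :
    stepB spares (j, ans) t = (j', ans + 1) := by
  simp only [stepB]
  rw [hj, dif_pos h, if_neg hgt]

theorem stepB_fail_end {spares : List Int} {j j' : Nat} {ans t : Int}
    (hj : pvSkip spares t j = j') (h : ¬ j' < spares.length) :
    stepB spares (j, ans) t = (j', ans + 1) := by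
  simp only [stepB]
  rw [hj, dif_neg h]

theorem sorted_lt_of_nodup (l : List Int) (hl : l.Nodup) :
    (PySem.List.sorted l (fun x => x) false).Pairwise (fun a b => a < b) := by
  have h1 := PySem.List.sorted_pairwise l (fun x => x)
  have h2 : (PySem.List.sorted l (fun x => x) false).Nodup :=
    ((PySem.List.sorted_perm l (fun x => x) false).symm).nodup hl
  have h2' : (PySem.List.sorted l (fun x => x) false).Pairwise (fun a b => a ≠ b) := h2
  exact (h1.and h2').imp (fun h => lt_of_le_of_ne h.1 h.2)

-- the heart of the proof: A's fold over the spare SET and B's fold with a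
-- pointer into the SORTED spare list agree, given the sweep invariant.
theorem loop_eq (spares : List Int) (hs : spares.Pairwise (fun a b => a < b)) :
    ∀ (bs ot : List Int) (j : Nat) (ans : Int),
    bs.Pairwise (fun a b => a < b) →
    ot.Nodup →
    (∀ t ∈ bs, t ∉ ot) →
    (∀ x ∈ spares.drop j, x ∈ ot) →
    (∀ x ∈ ot, x ∈ spares.drop j ∨ ∀ t ∈ bs, x < t - 1) →
    (bs.foldl stepA (ot, ans)).2 = (bs.foldl (stepB spares) (j, ans)).2 := by
  intro bs
  induction bs with
  | nil => intro ot j ans _ _ _ _ _; rfl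
  | cons t bs ih =>
    intro ot j ans hbs hnd hdisj hsub hinv
    obtain ⟨hbt, hbs'⟩ := List.pairwise_cons.mp hbs
    have htot : t ∉ ot := hdisj t (by simp)
    set J := pvSkip spares t j with hJ
    have hdropEq : spares.drop J = (spares.drop j).dropWhile (fun x => decide (x < t - 1)) :=
      pvSkip_drop spares t j
    have hsub' : ∀ x ∈ spares.drop J, x ∈ ot := by
      intro x hx
      rw [hdropEq] at hx
      exact hsub x (List.Sublist.mem hx (List.dropWhile_sublist _))
    have hkeep : ∀ x, x ∈ spares.drop j → ¬ x < t - 1 → x ∈ spares.drop J := by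
      intro x hx hge
      rw [hdropEq]
      exact mem_dropWhile_of_not hx (by simpa using hge)
    have hpair' : (spares.drop J).Pairwise (fun a b => a < b) :=
      List.Pairwise.sublist (List.drop_sublist _ _) hs
    simp only [List.foldl_cons]
    by_cases hA1 : (t - 1) ∈ ot
    · -- A removes team-1; B's pointer sits on team-1 and consumes it
      have hmem : (t - 1) ∈ spares.drop J := by
        rcases hinv _ hA1 with h | h
        · exact hkeep _ h (by omega)
        · exact absurd (h t (by simp)) (by omega)
      have hlen : J < spares.length := by
        by_contra hc
        rw [List.drop_eq_nil_of_le (Nat.le_of_not_lt hc)] at hmem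
        simp at hmem
      have hcons := List.drop_eq_getElem_cons hlen
      have hstop : ¬ spares[J] < t - 1 := by
        have hpf := dropWhile_head_false (spares.drop j) (hdropEq.symm.trans hcons)
        simpa using hpf
      have hhead : spares[J] = t - 1 := by
        rw [hcons] at hmem hpair'
        rcases List.mem_cons.mp hmem with h | h
        · omega
        · have := (List.pairwise_cons.mp hpair').1 _ h
          omega
      rw [stepA_mem_left hA1, stepB_consume hJ.symm hlen (by omega)]
      apply ih
      · exact hbs'
      · exact PySem.Set.nodup_discard _ _ hnd
      · intro t' ht' hmem'
        exact hdisj t' (by simp [ht']) ((PySem.Set.mem_discard _ _ _).mp hmem').1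
      · intro x hx
        have hxd : x ∈ spares.drop J := by
          rw [hcons]; exact List.mem_cons_of_mem _ hx
        have hxo := hsub' x hxd
        have hgtx : spares[J] < x := by
          rw [hcons] at hpair'
          exact (List.pairwise_cons.mp hpair').1 x hx
        exact (PySem.Set.mem_discard _ _ _).mpr ⟨hxo, by omega⟩
      · intro x hx
        obtain ⟨hxo, hxne⟩ := (PySem.Set.mem_discard _ _ _).mp hx
        rcases hinv x hxo with h | h
        · by_cases hxs : x < t - 1
          · right; intro t' ht'; have := hbt t' ht'; omega
          · have hx' : x ∈ spares.drop J := hkeep x h hxs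
            rw [hcons] at hx'
            rcases List.mem_cons.mp hx' with h2 | h2
            · omega
            · left; exact h2
        · right; intro t' ht'; exact h t' (by simp [ht'])
    · by_cases hA2 : (t + 1) ∈ ot
      · -- A removes team+1; B's pointer sits on team+1 and consumes it
        have hmem : (t + 1) ∈ spares.drop J := by
          rcases hinv _ hA2 with h | h
          · exact hkeep _ h (by omega)
          · exact absurd (h t (by simp)) (by omega)
        have hlen : J < spares.length := by
          by_contra hc
          rw [List.drop_eq_nil_of_le (Nat.le_of_not_lt hc)] at hmem
          simp at hmem
        have hcons := List.drop_eq_getElem_cons hlen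
        have hstop : ¬ spares[J] < t - 1 := by
          have hpf := dropWhile_head_false (spares.drop j) (hdropEq.symm.trans hcons)
          simpa using hpf
        have hJot : spares[J] ∈ ot := hsub' _ (by rw [hcons]; exact List.mem_cons.mpr (Or.inl rfl))
        have hne1 : spares[J] ≠ t - 1 := fun he => hA1 (he ▸ hJot)
        have hne0 : spares[J] ≠ t := fun he => htot (he ▸ hJot)
        have hhead : spares[J] = t + 1 := by
          rw [hcons] at hmem hpair'
          rcases List.mem_cons.mp hmem with h | h
          · omega
          · have := (List.pairwise_cons.mp hpair').1 _ h
            omega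
        rw [stepA_mem_right hA1 hA2, stepB_consume hJ.symm hlen (by omega)]
        apply ih
        · exact hbs'
        · exact PySem.Set.nodup_discard _ _ hnd
        · intro t' ht' hmem'
          exact hdisj t' (by simp [ht']) ((PySem.Set.mem_discard _ _ _).mp hmem').1
        · intro x hx
          have hxd : x ∈ spares.drop J := by
            rw [hcons]; exact List.mem_cons_of_mem _ hx
          have hxo := hsub' x hxd
          have hgtx : spares[J] < x := by
            rw [hcons] at hpair'
            exact (List.pairwise_cons.mp hpair').1 x hx
          exact (PySem.Set.mem_discard _ _ _).mpr ⟨hxo, by omega⟩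
        · intro x hx
          obtain ⟨hxo, hxne⟩ := (PySem.Set.mem_discard _ _ _).mp hx
          rcases hinv x hxo with h | h
          · by_cases hxs : x < t - 1
            · right; intro t' ht'; have := hbt t' ht'; omega
            · have hx' : x ∈ spares.drop J := hkeep x h hxs
              rw [hcons] at hx'
              rcases List.mem_cons.mp hx' with h2 | h2
              · omega
              · left; exact h2
          · right; intro t' ht'; exact h t' (by simp [ht'])
      · -- no adjacent spare: both count this team as unfixable
        have hstepA : stepA (ot, ans) t = (ot, ans + 1) := stepA_none hA1 hA2
        by_cases hlen : J < spares.length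
        · have hcons := List.drop_eq_getElem_cons hlen
          have hstop : ¬ spares[J] < t - 1 := by
            have hpf := dropWhile_head_false (spares.drop j) (hdropEq.symm.trans hcons)
            simpa using hpf
          have hJot : spares[J] ∈ ot := hsub' _ (by rw [hcons]; exact List.mem_cons.mpr (Or.inl rfl))
          have hne1 : spares[J] ≠ t - 1 := fun he => hA1 (he ▸ hJot)
          have hne0 : spares[J] ≠ t := fun he => htot (he ▸ hJot)
          have hne2 : spares[J] ≠ t + 1 := fun he => hA2 (he ▸ hJot)
          rw [hstepA, stepB_fail_long hJ.symm hlen (by omega)]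
          apply ih
          · exact hbs'
          · exact hnd
          · intro t' ht'; exact hdisj t' (by simp [ht'])
          · exact hsub'
          · intro x hx
            rcases hinv x hx with h | h
            · by_cases hxs : x < t - 1
              · right; intro t' ht'; have := hbt t' ht'; omega
              · left; exact hkeep x h hxs
            · right; intro t' ht'; exact h t' (by simp [ht'])
        · rw [hstepA, stepB_fail_end hJ.symm hlen]
          apply ih
          · exact hbs'
          · exact hnd
          · intro t' ht'; exact hdisj t' (by simp [ht'])
          · exact hsub'
          · intro x hx
            rcases hinv x hx with h | h
            · by_cases hxs : x < t - 1
              · right; intro t' ht'; have := hbt t' ht'; omega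
              · exact absurd (by
                  have := hkeep x h hxs
                  rwa [List.drop_eq_nil_of_le (Nat.le_of_not_lt hlen)] at this)
                  (by simp)
            · right; intro t' ht'; exact h t' (by simp [ht'])

theorem fold_version (B2 O : List Int) (hB : B2.Nodup) (hO : O.Nodup)
    (hdis : ∀ t ∈ B2, t ∉ O) :
    (((PySem.List.sorted B2 (fun x => x) false).foldl stepA (O, (0 : Int))).2 : Int)
      = ((PySem.List.sorted B2 (fun x => x) false).foldl
          (stepB (PySem.List.sorted O (fun x => x) false)) (0, (0 : Int))).2 := by
  apply loop_eq
  · exact sorted_lt_of_nodup O hO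
  · exact sorted_lt_of_nodup B2 hB
  · exact hO
  · intro t ht
    exact hdis t ((PySem.List.mem_sorted _ _ _ _).mp ht)
  · intro x hx
    rw [List.drop_zero] at hx
    exact (PySem.List.mem_sorted _ _ _ _).mp hx
  · intro x hx
    left
    rw [List.drop_zero]
    exact (PySem.List.mem_sorted _ _ _ _).mpr hx

theorem main_eq (N : Int) (S : Int) (R : Int) (brokenTeam : List Int) (onemoreTeam : List Int) :
    solve N S R brokenTeam onemoreTeam = solve_alt N S R brokenTeam onemoreTeam := by
  have hB : (PySem.Set.diff (PySem.Set.ofList brokenTeam)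
      (PySem.Set.inter (PySem.Set.ofList brokenTeam) (PySem.Set.ofList onemoreTeam))).Nodup :=
    PySem.Set.nodup_diff _ _ (PySem.Set.nodup_ofList _)
  have hO : (PySem.Set.diff (PySem.Set.ofList onemoreTeam)
      (PySem.Set.inter (PySem.Set.ofList brokenTeam) (PySem.Set.ofList onemoreTeam))).Nodup :=
    PySem.Set.nodup_diff _ _ (PySem.Set.nodup_ofList _)
  have hdis : ∀ t ∈ PySem.Set.diff (PySem.Set.ofList brokenTeam)
      (PySem.Set.inter (PySem.Set.ofList brokenTeam) (PySem.Set.ofList onemoreTeam)),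
      t ∉ PySem.Set.diff (PySem.Set.ofList onemoreTeam)
        (PySem.Set.inter (PySem.Set.ofList brokenTeam) (PySem.Set.ofList onemoreTeam)) := by
    intro t ht hto
    obtain ⟨htB, htnb⟩ := (PySem.Set.mem_diff _ _ _).mp ht
    obtain ⟨htO, _⟩ := (PySem.Set.mem_diff _ _ _).mp hto
    exact htnb ((PySem.Set.mem_inter _ _ _).mpr ⟨htB, htO⟩)
  exact fold_version _ _ hB hO hdis

-- ===== VERDICT (by name: the statement is the Claim_ definition above) =====
theorem solve_spec : Claim_equal_solve := by
  intro N S R brokenTeam onemoreTeam _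
  exact main_eq N S R brokenTeam onemoreTeam
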